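-- pv_equiv track=rewrite | github.com/theperiperi/Advent-of-Code-2024 | day5/part1.py | is_valid_update
-- ===== SOURCE A (Python) =====
-- from collections import defaultdict, deque
--
-- def is_valid_update(update, graph, in_degree):
--     # Filter the graph for only pages in this update
--     sub_graph = defaultdict(list)
--     sub_in_degree = defaultdict(int)
--
--     for x in update:
--         sub_in_degree[x] = 0
--
--     for x, neighbors in graph.items():
--         if x in update:
--             for y in neighbors:
--                 if y in update:
--                     sub_graph[x].append(y)
--                     sub_in_degree[y] += 1
--
--     # Perform topological sort
--     queue = deque([node for node in update if sub_in_degree[node] == 0])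
--     sorted_order = []
--
--     while queue:
--         node = queue.popleft()
--         sorted_order.append(node)
--         for neighbor in sub_graph[node]:
--             sub_in_degree[neighbor] -= 1
--             if sub_in_degree[neighbor] == 0:
--                 queue.append(neighbor)
--
--     return sorted_order == update
-- ===== SOURCE B (Python) =====
-- def is_valid_update(update, graph, in_degree):
--     # Verification instead of construction: A is True exactly when `update` is
--     # the enqueue sequence of the FIFO topological sort of the subgraph.  So
--     # the queue is always the contiguous window update[i:m]; we keep only the
--     # two window indices i, m and check each enqueue event against update,
--     # never building a queue, a sorted_order list or a sub_graph dict.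
--     pages = set(update)
--     indeg = {x: 0 for x in update}
--     for x in pages:
--         for y in graph.get(x, ()):
--             if y in pages:
--                 indeg[y] += 1
--     n = len(update)
--     # initial enqueues: the zero-indegree pages must form a prefix of update
--     m = 0
--     while m < n and indeg[update[m]] == 0:
--         m += 1
--     for j in range(m, n):
--         if indeg[update[j]] == 0:
--             return False
--     # pops: process update[i]; every counter that hits zero must enqueue
--     # exactly the next page of update (advance the window's right edge m)
--     i = 0
--     while i < m:
--         for y in graph.get(update[i], ()):
--             if y in pages:
--                 indeg[y] -= 1
--                 if indeg[y] == 0: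
--                     if m < n and update[m] == y:
--                         m += 1
--                     else:
--                         return False
--         i += 1
--     return m == n
-- ===== Notes on version B (the rewrite author's own statement) =====
-- stated objective: faster
-- what changed: B verifies instead of constructs: A's result is True exactly when `update` is the enqueue sequence of the FIFO topological sort, so the queue is always a contiguous window update[i:m]; B keeps only the two window indices and checks every enqueue event (initial zero-indegree prefix, then each counter hitting zero) against the next page of update, building no queue, no sorted_order list and no sub_graph dict, and looking up only the update's pages in graph via a set.
import Mathlib
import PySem

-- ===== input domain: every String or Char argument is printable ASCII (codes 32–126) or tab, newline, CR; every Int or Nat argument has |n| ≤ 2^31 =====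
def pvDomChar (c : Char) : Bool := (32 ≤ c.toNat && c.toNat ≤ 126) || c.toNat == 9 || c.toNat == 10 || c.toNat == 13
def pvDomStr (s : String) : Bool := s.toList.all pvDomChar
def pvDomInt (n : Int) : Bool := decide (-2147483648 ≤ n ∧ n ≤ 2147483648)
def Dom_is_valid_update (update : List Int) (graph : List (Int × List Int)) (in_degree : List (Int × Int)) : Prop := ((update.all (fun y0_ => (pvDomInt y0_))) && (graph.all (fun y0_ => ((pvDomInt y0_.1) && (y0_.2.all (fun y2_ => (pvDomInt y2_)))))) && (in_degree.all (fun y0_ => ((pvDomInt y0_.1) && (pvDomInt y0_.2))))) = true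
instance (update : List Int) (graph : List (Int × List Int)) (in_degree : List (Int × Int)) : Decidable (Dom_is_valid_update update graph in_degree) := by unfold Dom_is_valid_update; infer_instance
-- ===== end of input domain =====

-- B verifies that `update` is itself the enqueue sequence of the FIFO topological sort
-- (so the queue is always the window update[i:m], kept as two indices): no queue, no
-- sorted_order list and no sub_graph dict are built (objective: faster).

-- ===== PORT A =====
-- Kahn while-loop of A.  Fuel note: every iteration pops one node and appends it to
-- sorted_order, so after update.length + 1 iterations sorted_order is strictly longer
-- than update and A's final comparison `sorted_order == update` is False; hence
-- returning false on fuel exhaustion is exactly A's eventual value.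
def isvuLoopA (update : List Int) (subGraph : PySem.Dict Int (List Int)) :
    Nat → List Int → PySem.Dict Int Int → List Int → Bool
  | _, [], _, sortedOrder => decide (sortedOrder = update)
  | 0, _ :: _, _, _ => false
  | fuel+1, node :: rest, deg, sortedOrder =>
    let st := (subGraph.getD node []).foldl
      (fun (st : List Int × PySem.Dict Int Int) y =>
        let d := st.2.modify y 0 (· - 1)
        (if d.getD y 0 == 0 then st.1 ++ [y] else st.1, d)) (rest, deg)
    isvuLoopA update subGraph fuel st.1 st.2 (sortedOrder ++ [node])

def is_valid_update (update : List Int) (graph : List (Int × List Int)) (in_degree : List (Int × Int)) : Bool :=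
  -- for x in update: sub_in_degree[x] = 0
  let subInDeg0 : PySem.Dict Int Int := update.foldl (fun d x => d.insert x 0) PySem.Dict.empty
  -- for x, neighbors in graph.items(): if x in update: for y in neighbors: if y in update: …
  let built := graph.foldl
    (fun (st : PySem.Dict Int (List Int) × PySem.Dict Int Int) p =>
      if p.1 ∈ update then
        p.2.foldl (fun st y =>
          if y ∈ update then (st.1.modify p.1 [] (· ++ [y]), st.2.modify y 0 (· + 1)) else st) st
      else st) (PySem.Dict.empty, subInDeg0)
  let queue := update.filter (fun n => built.2.getD n 0 == 0)
  isvuLoopA update built.1 (update.length + 1) queue built.2 []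

-- ===== PORT B =====
-- B's inner scan over the neighbours of the page being popped: each counter that hits
-- zero must enqueue exactly the next page update[m]; python's early `return False` = none.
def isvuStepB (update : List Int) (pages : PySem.Set Int) :
    List Int → Nat → PySem.Dict Int Int → Option (Nat × PySem.Dict Int Int)
  | [], m, deg => some (m, deg)
  | y :: ys, m, deg =>
    if y ∈ pages then
      let d := deg.modify y 0 (· - 1)
      if d.getD y 0 == 0 then
        if m < update.length ∧ update.getD m 0 == y then isvuStepB update pages ys (m + 1) d
        else none
      else isvuStepB update pages ys m d
    else isvuStepB update pages ys m deg

-- B's `while i < m` window loop.  Fuel note: every iteration advances i and keeps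
-- i < m ≤ update.length, so fuel update.length + 1 is never exhausted before B returns.
def isvuLoopB (update : List Int) (graph : List (Int × List Int)) (pages : PySem.Set Int) :
    Nat → Nat → Nat → PySem.Dict Int Int → Bool
  | 0, i, m, _ => if i < m then false else decide (m = update.length)
  | fuel + 1, i, m, deg =>
    if i < m then
      match isvuStepB update pages (((PySem.Dict.mk graph).get? (update.getD i 0)).getD []) m deg with
      | none => false
      | some (m', deg') => isvuLoopB update graph pages fuel (i + 1) m' deg'
    else decide (m = update.length)

-- B's initial `while m < n and indeg[update[m]] == 0` scan; the loop runs at most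
-- update.length - m times, so fuel update.length suffices.
def isvuScan (update : List Int) (d : PySem.Dict Int Int) : Nat → Nat → Nat
  | 0, m => m
  | k + 1, m =>
    if m < update.length ∧ (d.getD (update.getD m 0) 0 == 0) then isvuScan update d k (m + 1)
    else m

def is_valid_update_alt (update : List Int) (graph : List (Int × List Int)) (in_degree : List (Int × Int)) : Bool :=
  let pages : PySem.Set Int := PySem.Set.ofList update
  -- indeg = {x: 0 for x in update}
  let indeg0 : PySem.Dict Int Int := update.foldl (fun d x => d.insert x 0) PySem.Dict.empty
  -- for x in pages: for y in graph.get(x, ()): if y in pages: indeg[y] += 1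
  let indeg := pages.foldl (fun d x =>
    (((PySem.Dict.mk graph).get? x).getD []).foldl
      (fun d y => if y ∈ pages then d.modify y 0 (· + 1) else d) d) indeg0
  let m0 := isvuScan update indeg update.length 0
  -- for j in range(m0, n): if indeg[update[j]] == 0: return False — over the pages update[m0:]
  if (update.drop m0).all (fun p => !(indeg.getD p 0 == 0)) then
    isvuLoopB update graph pages (update.length + 1) 0 m0 indeg
  else false

-- ===== PRECONDITION & SPEC =====
-- Pre_ excludes only association lists with a duplicated key in `graph`: `graph` stands
-- for a Python dict, whose keys are necessarily distinct, so no Python input is excluded.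
def Pre_is_valid_update (update : List Int) (graph : List (Int × List Int)) (in_degree : List (Int × Int)) : Prop :=
  (graph.map Prod.fst).Nodup
instance (update : List Int) (graph : List (Int × List Int)) (in_degree : List (Int × Int)) : Decidable (Pre_is_valid_update update graph in_degree) := by unfold Pre_is_valid_update; infer_instance

def pvWitness_is_valid_update : List Int × (List (Int × List Int)) × (List (Int × Int)) :=
  ([1, 2], [(1, [2])], [])

def Spec_is_valid_update (update : List Int) (graph : List (Int × List Int)) (in_degree : List (Int × Int)) (out : Bool) : Prop := out = is_valid_update_alt update graph in_degree
instance (update : List Int) (graph : List (Int × List Int)) (in_degree : List (Int × Int)) (out : Bool) : Decidable (Spec_is_valid_update update graph in_degree out) := by unfold Spec_is_valid_update; infer_instance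

-- ===== CLAIM (what is proved, stated in full; the proofs are below) =====
def Claim_equal_is_valid_update : Prop := ∀ (update : List Int) (graph : List (Int × List Int)) (in_degree : List (Int × Int)), Dom_is_valid_update update graph in_degree → Pre_is_valid_update update graph in_degree → Spec_is_valid_update update graph in_degree (is_valid_update update graph in_degree)

-- ===== LEMMAS AND PROOFS =====

-- the Kahn inner step of A: decrement y's in-degree, enqueue y if it hit 0
def pvKStep (st : List Int × PySem.Dict Int Int) (y : Int) : List Int × PySem.Dict Int Int :=
  let d := st.2.modify y 0 (· - 1)
  (if d.getD y 0 == 0 then st.1 ++ [y] else st.1, d)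

lemma pv_stepA_eq : (fun (st : List Int × PySem.Dict Int Int) y =>
    let d := st.2.modify y 0 (· - 1)
    (if d.getD y 0 == 0 then st.1 ++ [y] else st.1, d)) = pvKStep := rfl

-- a fold with two independently-updated accumulators is two folds
lemma pv_foldl_pair {α β γ : Type} (step : α × β → γ → α × β) (f : α → γ → α) (g : β → γ → β)
    (h : ∀ a b c, step (a, b) c = (f a c, g b c)) :
    ∀ (l : List γ) (a : α) (b : β), l.foldl step (a, b) = (l.foldl f a, l.foldl g b) := by
  intro l
  induction l with
  | nil => intro a b; rfl
  | cons x t ih => intro a b; simp only [List.foldl_cons, h a b x]; exact ih _ _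

-- the sub_graph-building component of A's combined loop
def pvGA (update : List Int) (g : PySem.Dict Int (List Int)) (p : Int × List Int) :
    PySem.Dict Int (List Int) :=
  if p.1 ∈ update then
    p.2.foldl (fun g y => if y ∈ update then g.modify p.1 [] (· ++ [y]) else g) g
  else g

-- the sub_in_degree-building component of A's combined loop
def pvDA (update : List Int) (d : PySem.Dict Int Int) (p : Int × List Int) :
    PySem.Dict Int Int :=
  if p.1 ∈ update then
    p.2.foldl (fun d y => if y ∈ update then d.modify y 0 (· + 1) else d) d
  else d

lemma pv_built_eq (update : List Int) (graph : List (Int × List Int)) (d0 : PySem.Dict Int Int) :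
    graph.foldl
      (fun (st : PySem.Dict Int (List Int) × PySem.Dict Int Int) p =>
        if p.1 ∈ update then
          p.2.foldl (fun st y =>
            if y ∈ update then (st.1.modify p.1 [] (· ++ [y]), st.2.modify y 0 (· + 1)) else st) st
        else st) (PySem.Dict.empty, d0)
    = (graph.foldl (pvGA update) PySem.Dict.empty, graph.foldl (pvDA update) d0) := by
  apply pv_foldl_pair
  intro a b p
  unfold pvGA pvDA
  by_cases hp : p.1 ∈ update
  · simp only [hp, if_true]
    exact pv_foldl_pair _ _ _ (fun a b y => by by_cases hy : y ∈ update <;> simp [hy]) p.2 a b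
  · simp [hp]

-- B's view of the relevant out-neighbours of a page
def pvF (update : List Int) (graph : List (Int × List Int)) (x : Int) : List Int :=
  (((PySem.Dict.mk graph).get? x).getD []).filter (fun z => decide (z ∈ update))

lemma pv_getD_nested_count {γ : Type} (C : γ → List Int) (l : List γ) (d : PySem.Dict Int Int)
    (y : Int) :
    (l.foldl (fun d p => (C p).foldl (fun d z => d.modify z 0 (· + 1)) d) d).getD y 0
      = d.getD y 0 + ((l.flatMap C).count y : Int) := by
  rw [← List.foldl_flatMap, PySem.Dict.getD_foldl_modify_add_one]

lemma pv_getD_nested_append {γ : Type} (C : γ → List (Int × Int)) (l : List γ)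
    (d : PySem.Dict Int (List Int)) (c : Int) :
    (l.foldl (fun d p => (C p).foldl (fun d pr => d.modify pr.1 [] (· ++ [pr.2])) d) d).getD c []
      = d.getD c [] ++ ((l.flatMap C).filter (fun pr => pr.1 == c)).map Prod.snd := by
  rw [← List.foldl_flatMap, PySem.Dict.getD_foldl_modify_append]

lemma pv_getD_insert0 (l : List Int) :
    ∀ (d : PySem.Dict Int Int), (∀ z, d.getD z 0 = 0) →
      ∀ y, (l.foldl (fun d x => d.insert x 0) d).getD y 0 = 0 := by
  induction l with
  | nil => intro d h y; exact h y
  | cons x t ih =>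
    intro d h y
    simp only [List.foldl_cons]
    refine ih _ (fun z => ?_) y
    rw [PySem.Dict.getD_insert]
    split
    · rfl
    · exact h z

lemma pv_flatMap_congr {α β : Type} (f g : α → List β) :
    ∀ (l : List α), (∀ x ∈ l, f x = g x) → l.flatMap f = l.flatMap g := by
  intro l
  induction l with
  | nil => intro _; rfl
  | cons x t ih =>
    intro h
    simp only [List.flatMap_cons, h x (List.mem_cons_self ..), ih (fun y hy => h y (List.mem_cons_of_mem _ hy))]

lemma pv_flatMap_ite {α β : Type} (p : α → Prop) [DecidablePred p] (F : α → List β) :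
    ∀ l : List α,
      l.flatMap (fun x => if p x then F x else []) = (l.filter (fun x => decide (p x))).flatMap F := by
  intro l
  induction l with
  | nil => rfl
  | cons x t ih => by_cases hx : p x <;> simp [hx, ih]

lemma pv_flatMap_drop {α β : Type} (q : α → Bool) (F : α → List β) :
    ∀ l : List α, (∀ x ∈ l, q x = false → F x = []) →
      l.flatMap F = (l.filter q).flatMap F := by
  intro l
  induction l with
  | nil => intro _; rfl
  | cons x t ih =>
    intro h
    rcases hx : q x with hf | ht
    · simp [hx, h x (List.mem_cons_self ..), ih (fun y hy => h y (List.mem_cons_of_mem _ hy))]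
    · simp [hx, ih (fun y hy => h y (List.mem_cons_of_mem _ hy))]

-- no pair with first component `node` comes from items whose key is not `node`
lemma pv_pairs_nokey (update : List Int) (node : Int) :
    ∀ graph : List (Int × List Int), node ∉ graph.map Prod.fst →
      ((graph.flatMap (fun p => if p.1 ∈ update then
          ((p.2.filter (fun z => decide (z ∈ update))).map (fun y => (p.1, y))) else [])).filter
        (fun pr => pr.1 == node)) = [] := by
  intro graph
  induction graph with
  | nil => intro _; rfl
  | cons p t ih =>
    intro h
    simp only [List.map_cons, List.mem_cons, not_or] at h
    simp only [List.flatMap_cons, List.filter_append, ih h.2, List.append_nil]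
    by_cases hp : p.1 ∈ update
    · simp only [hp, if_true, List.filter_map]
      have : ∀ y : Int, ((fun pr : Int × Int => pr.1 == node) ∘ (fun y => (p.1, y))) y = false := by
        intro y; simp [Function.comp]; exact fun hc => h.1 hc.symm
      rw [List.filter_congr (fun y _ => this y)]
      simp
    · simp [hp]

-- characterisation of the pairs with key `node` in the flattened sub_graph insertions
lemma pv_subChar (update : List Int) (node : Int) (hnode : node ∈ update) :
    ∀ graph : List (Int × List Int), (graph.map Prod.fst).Nodup →
      ((graph.flatMap (fun p => if p.1 ∈ update then
          ((p.2.filter (fun z => decide (z ∈ update))).map (fun y => (p.1, y))) else [])).filter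
        (fun pr => pr.1 == node)).map Prod.snd
      = pvF update graph node := by
  intro graph
  induction graph with
  | nil =>
    intro _
    simp [pvF, show (PySem.Dict.mk ([] : List (Int × List Int))).get? node = none from rfl]
  | cons p t ih =>
    intro hnd
    simp only [List.map_cons, List.nodup_cons] at hnd
    simp only [List.flatMap_cons, List.filter_append, List.map_append]
    unfold pvF
    rw [PySem.Dict.get?_mk_cons]
    by_cases hk : p.1 = node
    · subst hk
      have hrest : ((t.flatMap (fun p => if p.1 ∈ update then
          ((p.2.filter (fun z => decide (z ∈ update))).map (fun y => (p.1, y))) else [])).filter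
          (fun pr => pr.1 == p.1)) = [] := pv_pairs_nokey update p.1 t hnd.1
      rw [hrest]
      simp only [hnode, if_true, beq_self_eq_true, List.filter_map, List.map_nil, List.append_nil]
      have : ∀ y : Int, ((fun pr : Int × Int => pr.1 == p.1) ∘ (fun y => (p.1, y))) y = true := by
        intro y; simp [Function.comp]
      rw [List.filter_congr (fun y _ => this y), List.filter_true]
      simp
    · have hbeq : (p.1 == node) = false := beq_eq_false_iff_ne.mpr hk
      rw [hbeq]
      have hblock : ((if p.1 ∈ update then
          ((p.2.filter (fun z => decide (z ∈ update))).map (fun y => (p.1, y))) else []).filter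
          (fun pr => pr.1 == node)) = [] := by
        by_cases hp : p.1 ∈ update
        · simp only [hp, if_true, List.filter_map]
          have : ∀ y : Int, ((fun pr : Int × Int => pr.1 == node) ∘ (fun y => (p.1, y))) y = false := by
            intro y; simp [Function.comp]; exact hk
          rw [List.filter_congr (fun y _ => this y)]
          simp
        · simp [hp]
      rw [hblock]
      simpa [pvF] using ih hnd.2

-- shape of A's in-degree fold as a nested counting fold
lemma pv_DA_shape (update : List Int) (graph : List (Int × List Int)) (d0 : PySem.Dict Int Int) :
    graph.foldl (pvDA update) d0
      = graph.foldl (fun d p =>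
          ((if p.1 ∈ update then p.2.filter (fun z => decide (z ∈ update)) else []).foldl
            (fun d z => d.modify z 0 (· + 1)) d)) d0 := by
  apply PySem.List.foldl_congr_mem
  intro d p _
  unfold pvDA
  by_cases hp : p.1 ∈ update
  · simp only [hp, if_true]
    exact PySem.List.foldl_ite_eq_foldl_filter ..
  · simp [hp]

-- shape of B's in-degree fold as the same kind of nested counting fold
lemma pv_DB_shape (update : List Int) (graph : List (Int × List Int)) (d0 : PySem.Dict Int Int) :
    (PySem.Set.ofList update : List Int).foldl (fun d x =>
        (((PySem.Dict.mk graph).get? x).getD []).foldl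
          (fun d y => if y ∈ (PySem.Set.ofList update : List Int) then d.modify y 0 (· + 1) else d) d) d0
      = (PySem.Set.ofList update : List Int).foldl (fun d x =>
          (pvF update graph x).foldl (fun d z => d.modify z 0 (· + 1)) d) d0 := by
  apply PySem.List.foldl_congr_mem
  intro d x _
  rw [PySem.List.foldl_ite_eq_foldl_filter]
  have hset : (fun z => decide (z ∈ (PySem.Set.ofList update : List Int)))
      = (fun z => decide (z ∈ update)) :=
    funext fun z => decide_eq_decide.mpr (PySem.Set.mem_ofList ..)
  rw [hset, ← pvF]

-- the multiset of in-degree increments is the same on both sides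
lemma pv_count_eq (update : List Int) (graph : List (Int × List Int))
    (hnd : (graph.map Prod.fst).Nodup) (z : Int) :
    ((graph.flatMap (fun p => if p.1 ∈ update then
        p.2.filter (fun w => decide (w ∈ update)) else [])).count z)
      = ((PySem.Set.ofList update : List Int).flatMap (pvF update graph)).count z := by
  have hA1 : graph.flatMap (fun p => if p.1 ∈ update then
        p.2.filter (fun w => decide (w ∈ update)) else [])
      = graph.flatMap (fun p => if p.1 ∈ update then pvF update graph p.1 else []) := by
    apply pv_flatMap_congr
    intro p hp
    have : (PySem.Dict.mk graph).get? p.1 = some p.2 :=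
      PySem.Dict.get?_of_mem_items (d := PySem.Dict.mk graph) (k := p.1) (v := p.2) hp hnd
    by_cases hu : p.1 ∈ update
    · simp [hu, pvF, this]
    · simp [hu]
  have hA2 : graph.flatMap (fun p => if p.1 ∈ update then pvF update graph p.1 else [])
      = ((graph.map Prod.fst).filter (fun x => decide (x ∈ update))).flatMap (pvF update graph) := by
    conv_rhs => rw [← pv_flatMap_ite (fun x => x ∈ update) (pvF update graph) (graph.map Prod.fst)]
    rw [List.flatMap_map]
  have hB1 : (PySem.Set.ofList update : List Int).flatMap (pvF update graph)
      = ((PySem.Set.ofList update : List Int).filter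
          (fun x => ((PySem.Dict.mk graph).get? x).isSome)).flatMap (pvF update graph) := by
    apply pv_flatMap_drop
    intro x _ hx
    have : (PySem.Dict.mk graph).get? x = none := by
      cases hgx : (PySem.Dict.mk graph).get? x
      · rfl
      · rw [hgx] at hx; simp at hx
    simp [pvF, this]
  have hperm : ((graph.map Prod.fst).filter (fun x => decide (x ∈ update))).Perm
      ((PySem.Set.ofList update : List Int).filter
        (fun x => ((PySem.Dict.mk graph).get? x).isSome)) := by
    rw [List.perm_ext_iff_of_nodup (hnd.filter _) ((PySem.Set.nodup_ofList update).filter _)]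
    intro a
    simp only [List.mem_filter, decide_eq_true_eq]
    constructor
    · intro ⟨hk, hu⟩
      refine ⟨(PySem.Set.mem_ofList ..).mpr hu, ?_⟩
      cases hga : (PySem.Dict.mk graph).get? a
      · exact absurd ((PySem.Dict.get?_eq_none_iff_not_mem_keys ..).mp hga) (by exact fun h => h hk)
      · rfl
    · intro ⟨hu, hs⟩
      refine ⟨?_, (PySem.Set.mem_ofList ..).mp hu⟩
      by_contra hk
      rw [(PySem.Dict.get?_eq_none_iff_not_mem_keys ..).mpr hk] at hs
      simp at hs
  rw [hA1, hA2, hB1]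
  exact (hperm.flatMap (fun a _ => List.Perm.refl _)).count_eq z

-- A's sub_graph lists, for pages of the update, are exactly B's filtered lookups
lemma pv_GA_getD (update : List Int) (graph : List (Int × List Int))
    (hnd : (graph.map Prod.fst).Nodup) :
    ∀ n ∈ update, (graph.foldl (pvGA update) PySem.Dict.empty).getD n [] = pvF update graph n := by
  intro n hn
  have hshape : graph.foldl (pvGA update) PySem.Dict.empty
      = graph.foldl (fun g p =>
          ((if p.1 ∈ update then
              (p.2.filter (fun z => decide (z ∈ update))).map (fun y => (p.1, y)) else []).foldl
            (fun g pr => g.modify pr.1 [] (· ++ [pr.2])) g)) PySem.Dict.empty := by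
    apply PySem.List.foldl_congr_mem
    intro g p _
    unfold pvGA
    by_cases hp : p.1 ∈ update
    · simp only [hp, if_true]
      rw [PySem.List.foldl_ite_eq_foldl_filter, List.foldl_map]
    · simp [hp]
  rw [hshape, pv_getD_nested_append, PySem.Dict.getD_empty, List.nil_append]
  exact pv_subChar update n hn graph hnd

lemma pv_take_base (update : List Int) (i : Nat) (hi : i ≤ update.length) :
    decide (update.take i = update) = decide (i = update.length) := by
  rw [decide_eq_decide]
  constructor
  · intro h
    have := congrArg List.length h
    simp [List.length_take] at this
    omega
  · intro h
    subst h
    exact List.take_length ..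

lemma pv_take_succ_getD (update : List Int) (i : Nat) (hi : i < update.length) :
    update.take (i + 1) = update.take i ++ [update.getD i 0] := by
  rw [List.take_add_one, List.getD_eq_getElem?_getD, List.getElem?_eq_getElem hi]
  rfl

lemma pv_getD_lt (update : List Int) (j : Nat) (h : j < update.length) :
    update.getD j 0 = update[j] := by
  rw [List.getD_eq_getElem?_getD, List.getElem?_eq_getElem h]
  rfl

-- A's inner fold only ever appends to the queue
lemma pv_fold_queue_ext (L : List Int) :
    ∀ (q : List Int) (d : PySem.Dict Int Int), ∃ t, (L.foldl pvKStep (q, d)).1 = q ++ t := by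
  induction L with
  | nil => intro q d; exact ⟨[], by simp⟩
  | cons y ys ih =>
    intro q d
    simp only [List.foldl_cons]
    have hst : pvKStep (q, d) y
        = ((if (d.modify y 0 (· - 1)).getD y 0 == 0 then q ++ [y] else q), d.modify y 0 (· - 1)) := rfl
    rw [hst]
    split
    · obtain ⟨t, ht⟩ := ih (q ++ [y]) (d.modify y 0 (· - 1))
      exact ⟨y :: t, by simpa using ht⟩
    · exact ih q (d.modify y 0 (· - 1))

-- once sorted ++ queue stops being a prefix of update, A's loop can only answer false
lemma pv_loopA_bad (update : List Int) (sub : PySem.Dict Int (List Int)) :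
    ∀ (fuel : Nat) (q : List Int) (deg : PySem.Dict Int Int) (sorted : List Int),
      ¬ (sorted ++ q <+: update) → isvuLoopA update sub fuel q deg sorted = false := by
  intro fuel
  induction fuel with
  | zero =>
    intro q deg sorted h
    cases q with
    | nil =>
      simp only [isvuLoopA, decide_eq_false_iff_not]
      intro he; exact h (by simp [he])
    | cons a q => rfl
  | succ f ih =>
    intro q deg sorted h
    cases q with
    | nil =>
      simp only [isvuLoopA, decide_eq_false_iff_not]
      intro he; exact h (by simp [he])
    | cons node rest =>
      simp only [isvuLoopA, pv_stepA_eq]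
      apply ih
      obtain ⟨t, ht⟩ := pv_fold_queue_ext (sub.getD node []) rest deg
      rw [ht]
      intro hp
      apply h
      have h1 : sorted ++ node :: rest <+: (sorted ++ [node]) ++ (rest ++ t) := by
        refine ⟨t, ?_⟩
        simp [List.append_assoc]
      exact h1.trans hp

-- a list that extends X by y at position |X| forces update[|X|] = y if it is a prefix
lemma pv_prefix_getD (X : List Int) (y : Int) (t : List Int) (update : List Int)
    (h : X ++ y :: t <+: update) :
    X.length < update.length ∧ update.getD X.length 0 = y := by
  obtain ⟨r, hr⟩ := h
  have hlen : X.length + (t.length + 1) + r.length = update.length := by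
    have := congrArg List.length hr
    simp at this
    omega
  constructor
  · omega
  · rw [← hr, List.getD_eq_getElem?_getD, List.append_assoc, List.getElem?_append_right (Nat.le_refl _)]
    simp

-- window segment facts
lemma pv_seg_nil (update : List Int) (i : Nat) : (update.take i).drop i = [] := by
  apply List.drop_eq_nil_of_le
  simp [List.length_take]

lemma pv_seg_cons (update : List Int) (i m : Nat) (him : i < m) (hm : m ≤ update.length) :
    (update.take m).drop i = update.getD i 0 :: (update.take m).drop (i + 1) := by
  have hi : i < (update.take m).length := by simp [List.length_take]; omega
  rw [List.drop_eq_getElem_cons hi]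
  congr 1
  rw [List.getElem_take, pv_getD_lt update i (by omega)]

lemma pv_seg_snoc (update : List Int) (i m : Nat) (him : i ≤ m) (hm : m < update.length) :
    (update.take m).drop i ++ [update.getD m 0] = (update.take (m + 1)).drop i := by
  rw [pv_take_succ_getD update m hm, List.drop_append_of_le_length (by simp [List.length_take]; omega)]

lemma pv_take_prefix_seg (update : List Int) (i m : Nat) (him : i ≤ m) (hm : m ≤ update.length) :
    update.take i ++ (update.take m).drop i = update.take m := by
  conv_rhs => rw [← List.take_append_drop i (update.take m)]
  congr 1
  rw [List.take_take, Nat.min_eq_left him]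

-- lock-step of A's inner adjacency fold with B's inner scan: if B's scan succeeds the
-- queue stays the window update[i+1:m'] and the counters agree; if it fails, A's queue
-- is no longer consistent with update and A can only answer false
lemma pv_step_eq (update : List Int) (i : Nat) :
    ∀ (L : List Int) (m : Nat) (dA dB : PySem.Dict Int Int),
      (∀ z, dA.getD z 0 = dB.getD z 0) → i + 1 ≤ m → m ≤ update.length →
      (match isvuStepB update (PySem.Set.ofList update) L m dB with
       | some md =>
           m ≤ md.1 ∧ md.1 ≤ update.length
           ∧ ((L.filter (fun z => decide (z ∈ update))).foldl pvKStep
               ((update.take m).drop (i + 1), dA)).1 = (update.take md.1).drop (i + 1)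
           ∧ ∀ z, ((L.filter (fun z => decide (z ∈ update))).foldl pvKStep
               ((update.take m).drop (i + 1), dA)).2.getD z 0 = md.2.getD z 0
       | none =>
           ¬ (update.take (i + 1) ++ ((L.filter (fun z => decide (z ∈ update))).foldl pvKStep
               ((update.take m).drop (i + 1), dA)).1 <+: update)) := by
  intro L
  induction L with
  | nil =>
    intro m dA dB hd him hm
    refine ⟨Nat.le_refl _, hm, ?_, ?_⟩
    · simp
    · intro z; simpa using hd z
  | cons y ys ih =>
    intro m dA dB hd him hm
    have hmem : (y ∈ (PySem.Set.ofList update : List Int)) ↔ y ∈ update := PySem.Set.mem_ofList ..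
    by_cases hy : y ∈ update
    · have hyp : y ∈ (PySem.Set.ofList update : List Int) := hmem.mpr hy
      have hd' : ∀ z, (dA.modify y 0 (· - 1)).getD z 0 = (dB.modify y 0 (· - 1)).getD z 0 := by
        intro z
        rw [PySem.Dict.getD_modify, PySem.Dict.getD_modify]
        split
        · rw [hd y]
        · exact hd z
      have hfc : (y :: ys).filter (fun z => decide (z ∈ update))
          = y :: ys.filter (fun z => decide (z ∈ update)) := by simp [hy]
      have hst : ∀ q : List Int, pvKStep (q, dA) y
          = ((if (dB.modify y 0 (· - 1)).getD y 0 == 0 then q ++ [y] else q),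
             dA.modify y 0 (· - 1)) := by
        intro q
        show ((if (dA.modify y 0 (· - 1)).getD y 0 == 0 then q ++ [y] else q), _) = _
        rw [hd' y]
      simp only [isvuStepB, if_pos hyp, hfc, List.foldl_cons, hst]
      by_cases hz : ((dB.modify y 0 (· - 1)).getD y 0 == 0) = true
      · simp only [hz, if_true]
        by_cases hg : m < update.length ∧ update.getD m 0 == y
        · rw [if_pos hg]
          have hyeq : update.getD m 0 = y := by
            have := hg.2; exact eq_of_beq this
          have hq : (update.take m).drop (i + 1) ++ [y] = (update.take (m + 1)).drop (i + 1) := by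
            rw [← hyeq]
            exact pv_seg_snoc update (i + 1) m him hg.1
          rw [hq]
          have := ih (m + 1) (dA.modify y 0 (· - 1)) (dB.modify y 0 (· - 1)) hd'
            (by omega) (by omega)
          rcases hB : isvuStepB update (PySem.Set.ofList update) ys (m + 1)
              (dB.modify y 0 (· - 1)) with _ | md
          · rw [hB] at this; exact this
          · rw [hB] at this
            exact ⟨by omega, this.2.1, this.2.2⟩
        · rw [if_neg hg]
          -- B fails here: A's queue now carries y ≠ update[m] (or m = |update|)
          obtain ⟨t, ht⟩ := pv_fold_queue_ext (ys.filter (fun z => decide (z ∈ update)))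
            ((update.take m).drop (i + 1) ++ [y]) (dA.modify y 0 (· - 1))
          rw [ht]
          intro hp
          apply hg
          have hX : update.take (i + 1) ++ ((update.take m).drop (i + 1) ++ [y] ++ t)
              = update.take m ++ y :: t := by
            conv_rhs => rw [← pv_take_prefix_seg update (i + 1) m him hm]
            simp
          rw [hX] at hp
          have := pv_prefix_getD (update.take m) y t update hp
          rw [List.length_take, Nat.min_eq_left hm] at this
          exact ⟨this.1, by rw [this.2]; exact beq_self_eq_true y⟩
      · have hzf : ((dB.modify y 0 (· - 1)).getD y 0 == 0) = false := by
          simpa using hz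
        simp only [hzf, Bool.false_eq_true, if_false]
        exact ih m (dA.modify y 0 (· - 1)) (dB.modify y 0 (· - 1)) hd' him hm
    · have hyp : y ∉ (PySem.Set.ofList update : List Int) := fun hc => hy (hmem.mp hc)
      have hfc : (y :: ys).filter (fun z => decide (z ∈ update))
          = ys.filter (fun z => decide (z ∈ update)) := by simp [hy]
      simp only [isvuStepB, if_neg hyp, hfc]
      exact ih m dA dB hd him hm

-- main lock-step lemma: A's Kahn loop on the window queue equals B's index loop
lemma pv_loop_eq (update : List Int) (graph : List (Int × List Int))
    (sub : PySem.Dict Int (List Int))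
    (hsub : ∀ n ∈ update, sub.getD n [] = pvF update graph n) :
    ∀ (fuel : Nat) (i m : Nat) (dA dB : PySem.Dict Int Int),
      (∀ z, dA.getD z 0 = dB.getD z 0) → i ≤ m → m ≤ update.length →
      isvuLoopA update sub fuel ((update.take m).drop i) dA (update.take i)
        = isvuLoopB update graph (PySem.Set.ofList update) fuel i m dB := by
  intro fuel
  induction fuel with
  | zero =>
    intro i m dA dB hd him hm
    rcases Nat.eq_or_lt_of_le him with he | hlt
    · subst he
      rw [pv_seg_nil]
      simp only [isvuLoopA, isvuLoopB, Nat.lt_irrefl, if_false]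
      exact pv_take_base update i hm
    · rw [pv_seg_cons update i m hlt hm]
      simp only [isvuLoopA, isvuLoopB, if_pos hlt]
  | succ f ih =>
    intro i m dA dB hd him hm
    rcases Nat.eq_or_lt_of_le him with he | hlt
    · subst he
      rw [pv_seg_nil]
      simp only [isvuLoopA, isvuLoopB, Nat.lt_irrefl, if_false]
      exact pv_take_base update i hm
    · rw [pv_seg_cons update i m hlt hm]
      have hiu : update.getD i 0 ∈ update := by
        rw [pv_getD_lt update i (by omega)]
        exact List.getElem_mem _
      simp only [isvuLoopA, isvuLoopB, if_pos hlt, pv_stepA_eq]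
      rw [hsub (update.getD i 0) hiu]
      unfold pvF
      have hstep := pv_step_eq update i (((PySem.Dict.mk graph).get? (update.getD i 0)).getD [])
        m dA dB hd hlt hm
      rcases hB : isvuStepB update (PySem.Set.ofList update)
          (((PySem.Dict.mk graph).get? (update.getD i 0)).getD []) m dB with _ | ⟨m', dB'⟩
      · rw [hB] at hstep
        apply pv_loopA_bad
        rw [← pv_take_succ_getD update i (by omega)]
        exact hstep
      · rw [hB] at hstep
        obtain ⟨h1, h2, h3, h4⟩ := hstep
        rw [h3]
        have hsor : update.take i ++ [update.getD i 0] = update.take (i + 1) :=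
          (pv_take_succ_getD update i (by omega)).symm
        rw [hsor]
        exact ih (i + 1) m' _ dB' h4 (by omega) h2

-- specification of B's initial scan
lemma pv_scan_spec (update : List Int) (d : PySem.Dict Int Int) :
    ∀ (k m : Nat), update.length - m ≤ k → m ≤ update.length →
      m ≤ isvuScan update d k m ∧ isvuScan update d k m ≤ update.length
      ∧ (∀ j, m ≤ j → j < isvuScan update d k m → (d.getD (update.getD j 0) 0 == 0) = true)
      ∧ (isvuScan update d k m < update.length →
          ¬ ((d.getD (update.getD (isvuScan update d k m) 0) 0 == 0) = true)) := by
  intro k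
  induction k with
  | zero =>
    intro m hk hm
    have : m = update.length := by omega
    simp only [isvuScan]
    exact ⟨Nat.le_refl _, hm, fun j h1 h2 => absurd h2 (by omega), fun h => absurd h (by omega)⟩
  | succ k ih =>
    intro m hk hm
    by_cases hg : m < update.length ∧ (d.getD (update.getD m 0) 0 == 0)
    · simp only [isvuScan, if_pos hg]
      obtain ⟨ih1, ih2, ih3, ih4⟩ := ih (m + 1) (by omega) (by omega)
      refine ⟨by omega, ih2, ?_, ih4⟩
      intro j h1 h2
      rcases Nat.eq_or_lt_of_le h1 with he | hlt
      · subst he; exact hg.2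
      · exact ih3 j hlt h2
    · simp only [isvuScan, if_neg hg]
      exact ⟨Nat.le_refl _, hm, fun j h1 h2 => absurd h2 (by omega),
        fun h => fun hz => hg ⟨h, hz⟩⟩

-- if the zero-indegree pages are exactly those before position s, the filter is take s
lemma pv_filter_take (update : List Int) (z : Int → Bool) (s : Nat) (hs : s ≤ update.length)
    (hzero : ∀ j, j < s → z (update.getD j 0) = true) :
    (update.take s).filter z = update.take s := by
  apply List.filter_eq_self.mpr
  intro a ha
  obtain ⟨j, hj, hja⟩ := List.getElem_of_mem ha
  have hjs : j < s := by
    have := hj; simp [List.length_take] at this; omega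
  have hju : j < update.length := by omega
  have : a = update.getD j 0 := by
    rw [pv_getD_lt update j hju, ← hja, List.getElem_take]
  rw [this]
  exact hzero j hjs

-- ===== VERDICT (by name: the statement is the Claim_ definition above) =====
theorem is_valid_update_spec : Claim_equal_is_valid_update := by
  intro update graph in_degree _ hpre
  unfold Pre_is_valid_update at hpre
  unfold Spec_is_valid_update
  simp only [is_valid_update, is_valid_update_alt]
  rw [pv_built_eq]
  have hz : ∀ z : Int, (update.foldl (fun d x => d.insert x 0)
      (PySem.Dict.empty : PySem.Dict Int Int)).getD z 0 = 0 :=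
    pv_getD_insert0 update PySem.Dict.empty (fun z => PySem.Dict.getD_empty ..)
  have hdA : ∀ z, (graph.foldl (pvDA update)
      (update.foldl (fun d x => d.insert x 0) (PySem.Dict.empty : PySem.Dict Int Int))).getD z 0
      = ((graph.flatMap (fun p => if p.1 ∈ update then
          p.2.filter (fun w => decide (w ∈ update)) else [])).count z : Int) := by
    intro z
    rw [pv_DA_shape, pv_getD_nested_count, hz]
    simp
  have hdB : ∀ z, ((PySem.Set.ofList update : List Int).foldl (fun d x =>
        (((PySem.Dict.mk graph).get? x).getD []).foldl
          (fun d y => if y ∈ (PySem.Set.ofList update : List Int) then d.modify y 0 (· + 1) else d) d)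
        (update.foldl (fun d x => d.insert x 0) (PySem.Dict.empty : PySem.Dict Int Int))).getD z 0
      = (((PySem.Set.ofList update : List Int).flatMap (pvF update graph)).count z : Int) := by
    intro z
    rw [pv_DB_shape, pv_getD_nested_count, hz]
    simp
  have hd : ∀ z, (graph.foldl (pvDA update)
      (update.foldl (fun d x => d.insert x 0) (PySem.Dict.empty : PySem.Dict Int Int))).getD z 0
      = ((PySem.Set.ofList update : List Int).foldl (fun d x =>
          (((PySem.Dict.mk graph).get? x).getD []).foldl
            (fun d y => if y ∈ (PySem.Set.ofList update : List Int) then d.modify y 0 (· + 1) else d) d)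
          (update.foldl (fun d x => d.insert x 0) (PySem.Dict.empty : PySem.Dict Int Int))).getD z 0 := by
    intro z
    rw [hdA z, hdB z, pv_count_eq update graph hpre z]
  -- abbreviations
  set degB := (PySem.Set.ofList update : List Int).foldl (fun d x =>
      (((PySem.Dict.mk graph).get? x).getD []).foldl
        (fun d y => if y ∈ (PySem.Set.ofList update : List Int) then d.modify y 0 (· + 1) else d) d)
      (update.foldl (fun d x => d.insert x 0) (PySem.Dict.empty : PySem.Dict Int Int)) with hdegB
  set degA := graph.foldl (pvDA update)
      (update.foldl (fun d x => d.insert x 0) (PySem.Dict.empty : PySem.Dict Int Int)) with hdegA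
  have hqueue : update.filter (fun n => degA.getD n 0 == 0)
      = update.filter (fun n => degB.getD n 0 == 0) :=
    List.filter_congr (fun n _ => congrArg (fun t => t == 0) (hd n))
  rw [hqueue]
  set s := isvuScan update degB update.length 0 with hs
  obtain ⟨hs1, hs2, hs3, hs4⟩ := pv_scan_spec update degB update.length 0 (by omega) (by omega)
  rw [← hs] at hs1 hs2 hs3 hs4
  by_cases hall : ((update.drop s).all (fun p => !(degB.getD p 0 == 0))) = true
  · rw [if_pos hall]
    have hfilter : update.filter (fun n => degB.getD n 0 == 0) = update.take s := by
      conv_lhs => rw [← List.take_append_drop s update]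
      rw [List.filter_append,
        pv_filter_take update (fun n => degB.getD n 0 == 0) s hs2 (fun j hj => hs3 j (by omega) hj)]
      have : (update.drop s).filter (fun n => degB.getD n 0 == 0) = [] := by
        apply List.filter_eq_nil_iff.mpr
        intro a ha
        have := List.all_eq_true.mp hall a ha
        simp at this
        simp [this]
      rw [this, List.append_nil]
    rw [hfilter]
    have h0 : update.take s = (update.take s).drop 0 := rfl
    have h1 : ([] : List Int) = update.take 0 := rfl
    rw [h0, h1]
    exact pv_loop_eq update graph _ (pv_GA_getD update graph hpre) (update.length + 1) 0 s
      degA degB hd (Nat.zero_le _) hs2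
  · rw [if_neg hall]
    -- the zero-indegree pages are not a prefix of update: A's initial queue already
    -- deviates from update, so A answers false as well
    apply pv_loopA_bad
    rw [List.nil_append]
    have hsplit : update.filter (fun n => degB.getD n 0 == 0)
        = update.take s ++ (update.drop s).filter (fun n => degB.getD n 0 == 0) := by
      conv_lhs => rw [← List.take_append_drop s update]
      rw [List.filter_append,
        pv_filter_take update (fun n => degB.getD n 0 == 0) s hs2 (fun j hj => hs3 j (by omega) hj)]
    rcases hrest : (update.drop s).filter (fun n => degB.getD n 0 == 0) with _ | ⟨c, t⟩
    · exfalso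
      apply hall
      apply List.all_eq_true.mpr
      intro a ha
      have : ¬ (degB.getD a 0 == 0) = true := by
        intro hz0
        have : a ∈ (update.drop s).filter (fun n => degB.getD n 0 == 0) :=
          List.mem_filter.mpr ⟨ha, hz0⟩
        rw [hrest] at this
        simp at this
      simp at this
      simp [this]
    · rw [hsplit, hrest]
      intro hp
      have hc : (degB.getD c 0 == 0) = true := by
        have : c ∈ (update.drop s).filter (fun n => degB.getD n 0 == 0) := by
          rw [hrest]; exact List.mem_cons_self ..
        exact (List.mem_filter.mp this).2
      have := pv_prefix_getD (update.take s) c t update hp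
      rw [List.length_take, Nat.min_eq_left hs2] at this
      exact hs4 this.1 (by rw [this.2]; exact hc)
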